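-- pv_equiv track=rewrite | github.com/kapi-no/sdk-nrf | doc/find-my/conf.py | find_my_version_ncs_next
-- ===== SOURCE A (Python) =====
-- def find_my_version_ncs_next(versions_str):
--     if "latest-cs" in versions_str:
--         return "latest-cs"
--
--     versions_str_filtered = [x for x in versions_str
--                              if ("cs" in x) and ("latest" not in x)]
--     versions_str_filtered.sort(reverse=True)
--
--     if len(versions_str_filtered) > 0:
--         return versions_str_filtered[0]
--     else:
--         return "latest-cs"
-- ===== SOURCE B (Python) =====
-- def find_my_version_ncs_next(versions_str):
--     found_latest = False
--     best = None
--     for x in versions_str: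
--         if x == "latest-cs":
--             found_latest = True
--         if ("cs" in x) and ("latest" not in x):
--             if best is None or best < x:
--                 best = x
--     if found_latest or best is None:
--         return "latest-cs"
--     return best
-- ===== Notes on version B (the rewrite author's own statement) =====
-- stated objective: alternative
-- what changed: Replaced A's three traversals (list membership test, filtering comprehension, reverse sort then head) by one loop carrying two accumulators: a latest-cs flag and the running maximum of the filtered elements.
import Mathlib
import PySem

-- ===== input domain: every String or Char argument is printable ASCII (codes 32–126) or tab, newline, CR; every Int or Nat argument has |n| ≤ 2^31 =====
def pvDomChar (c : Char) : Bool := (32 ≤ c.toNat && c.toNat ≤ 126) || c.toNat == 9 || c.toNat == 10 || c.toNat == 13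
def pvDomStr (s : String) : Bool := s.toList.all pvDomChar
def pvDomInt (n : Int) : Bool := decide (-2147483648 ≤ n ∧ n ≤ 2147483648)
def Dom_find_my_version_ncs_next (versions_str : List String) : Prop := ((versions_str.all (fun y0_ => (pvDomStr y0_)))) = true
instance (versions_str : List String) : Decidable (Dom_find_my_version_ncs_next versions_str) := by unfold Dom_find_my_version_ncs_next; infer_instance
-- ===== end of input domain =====

-- B replaces A's three traversals (membership test, filter comprehension, reverse sort) by one
-- loop with two accumulators (a latest-cs flag and a running maximum); objective: alternative.


-- ===== PORT A =====
def find_my_version_ncs_next (versions_str : List String) : String :=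
  if versions_str.any (fun x => x == "latest-cs") then "latest-cs"
  else
    let versions_str_filtered := versions_str.filter
      (fun x => PySem.Str.isIn "cs" x && !(PySem.Str.isIn "latest" x))
    let s := PySem.List.sorted versions_str_filtered (fun x => x) true
    if s.length > 0 then s[0]! else "latest-cs"

-- ===== PORT B =====
def find_my_version_ncs_next_alt (versions_str : List String) : String :=
  let st := versions_str.foldl
    (fun (acc : Bool × Option String) x =>
      let found := if x == "latest-cs" then true else acc.1
      let best :=
        if PySem.Str.isIn "cs" x && !(PySem.Str.isIn "latest" x) then
          match acc.2 with
          | none => some x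
          | some b => if b < x then some x else some b
        else acc.2
      (found, best))
    (false, none)
  if st.1 then "latest-cs"
  else
    match st.2 with
    | none => "latest-cs"
    | some b => b

-- ===== PRECONDITION & SPEC =====
def Spec_find_my_version_ncs_next (versions_str : List String) (out : String) : Prop := out = find_my_version_ncs_next_alt versions_str
instance (versions_str : List String) (out : String) : Decidable (Spec_find_my_version_ncs_next versions_str out) := by unfold Spec_find_my_version_ncs_next; infer_instance

-- ===== CLAIM (what is proved, stated in full; the proofs are below) =====
def Claim_equal_find_my_version_ncs_next : Prop := ∀ (versions_str : List String), Dom_find_my_version_ncs_next versions_str → Spec_find_my_version_ncs_next versions_str (find_my_version_ncs_next versions_str)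

-- ===== LEMMAS AND PROOFS =====

-- B's max step on a some-accumulator is the running max of String's linear order
theorem pv_step_some (b x : String) :
    (if b < x then some x else some b) = some (max b x) := by
  split_ifs with h
  · rw [max_eq_right h.le]
  · rw [max_eq_left (not_lt.mp h)]

-- B's one loop carrying two independent accumulators is the pair of the two loops
theorem pv_fold_split (l : List String) (b : Bool) (o : Option String) :
    l.foldl (fun (acc : Bool × Option String) x =>
      (if x == "latest-cs" then true else acc.1,
       if PySem.Str.isIn "cs" x && !(PySem.Str.isIn "latest" x) then
         match acc.2 with
         | none => some x
         | some c => if c < x then some x else some c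
       else acc.2)) (b, o)
    = (l.foldl (fun acc x => if x == "latest-cs" then true else acc) b,
       l.foldl (fun acc x =>
         if PySem.Str.isIn "cs" x && !(PySem.Str.isIn "latest" x) then
           match acc with
           | none => some x
           | some c => if c < x then some x else some c
         else acc) o) := by
  induction l generalizing b o with
  | nil => rfl
  | cons y l ih => simp only [List.foldl_cons]; exact ih _ _

-- the option-valued running-max fold, once seeded, is the plain running max
theorem pv_foldl_some (t : List String) (b : String) :
    t.foldl (fun acc x => match acc with
      | none => some x
      | some c => if c < x then some x else some c) (some b)
    = some (t.foldl max b) := by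
  induction t generalizing b with
  | nil => rfl
  | cons y t ih =>
    simp only [List.foldl_cons]
    rw [pv_step_some]
    exact ih (max b y)

-- head of the reverse-sorted list = running max of the list
theorem pv_sorted_head_eq_max (h : String) (t : List String) :
    (PySem.List.sorted (h :: t) (fun x => x) true)[0]! = t.foldl max h := by
  have hne : PySem.List.sorted (h :: t) (fun x => x) true ≠ [] := by
    rw [ne_eq, PySem.List.sorted_eq_nil_iff]; simp
  obtain ⟨m, s, hs⟩ := List.exists_cons_of_ne_nil hne
  have hmem : m ∈ h :: t := by
    have hm : m ∈ PySem.List.sorted (h :: t) (fun x => x) true := by rw [hs]; simp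
    rwa [PySem.List.mem_sorted] at hm
  have hge : ∀ y ∈ h :: t, y ≤ m := PySem.List.key_head_sorted_rev_ge _ (fun x => x) hs
  have hM := PySem.List.le_foldl_max t h
  have hMmem : t.foldl max h ∈ h :: t := by
    rcases PySem.List.foldl_max_mem t h with he | he
    · rw [he]; simp
    · simp [he]
  have h1 : m ≤ t.foldl max h := by
    rcases List.mem_cons.mp hmem with he | he
    · rw [he]; exact hM.1
    · exact hM.2 m he
  rw [hs]
  simp only [List.getElem!_cons_zero]
  exact le_antisymm h1 (hge _ hMmem)

-- ===== VERDICT (by name: the statement is the Claim_ definition above) =====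
theorem find_my_version_ncs_next_spec : Claim_equal_find_my_version_ncs_next := by
  intro vs _
  unfold Spec_find_my_version_ncs_next find_my_version_ncs_next find_my_version_ncs_next_alt
  dsimp only
  rw [pv_fold_split]
  rw [PySem.List.foldl_if_true_eq]
  simp only [Bool.false_or]
  by_cases hl : vs.any (fun x => x == "latest-cs") = true
  · rw [if_pos hl, if_pos hl]
  · rw [if_neg hl, if_neg hl]
    rw [PySem.List.foldl_if_eq_foldl_filter]
    rcases hf : vs.filter (fun x => PySem.Str.isIn "cs" x && !(PySem.Str.isIn "latest" x)) with _ | ⟨h, t⟩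
    · simp [PySem.List.length_sorted]
    · simp only [List.foldl_cons, pv_foldl_some, PySem.List.length_sorted, List.length_cons]
      rw [if_pos (by simp)]
      exact pv_sorted_head_eq_max h t
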